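/- GENERATED by tools/from_farm_form.py from prooffarm-gif/accepted/DGifSetupDecompress.1/Lemmas.lean (a worked proof of the farm's unit `DGifSetupDecompress.1`,
   accepted by the verdict) — do not edit. -/
import Gif.Spec.Units.DGifSetupDecompress_1
import Gif.Spec.AllSegs

/-!
  Lemmas for the unit `DGifSetupDecompress.1` (a BODY segment of a protected function: the checked load of `GifFile->Private`, a
  reader call into the object `CodeSize` of the OWN frame, then the range test with two error arms that store `gif.Error`): the
  segment is walked in TWO STEPS that meet at the call's return address 0x1061e7 (`ret2`), with a private assertion there.

      sd1_AtRet2       the assertion at `ret2`: `Body` + the registers and facts that are live THERE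
      sd1_seg_call     0x1061c8 … the call of InternalRead … 0x1061e7: `AfterP` → `sd1_AtRet2`
      sd1_seg_tail     0x1061e7 … 0x106205 | 0x10633a (three arms): `sd1_AtRet2` → `AtStores ∨ Done`

  The general lemmas are those of Gif/Spec/FrameCarry.lean §5 (`Env.at_call`, `store_stack`, `store_gif`) and
  Gif/Spec/Carry.lean §4 (`BufOK.own`).
-/

open X86 X86.User Asan ProgX.Base ProgX.Base.Spec Gif.Spec

set_option maxRecDepth 4000
set_option maxHeartbeats 4000000

namespace Gif.Spec.DGifSetupDecompress_1

/-- **At 1061E7H (ret2), `InternalRead(gif, &CodeSize, 1)` has returned**: `Body`, `rbx = gif`, `r12 = Private`, `eax = k ≤ 1`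
the bytes delivered, and `k = 1` means the reader advanced by exactly 1. -/
structure sd1_AtRet2 (H : Heap) (rest : List Obj) (frames : List (Nat × FrameLayout)) (F : Forest) (R : Rd) (u₀ e : State)
    (ret : Word) (v : State) : Prop where
  body : DGifSetupDecompress.Body Gif.L.DGifSetupDecompress.ret2 H rest frames F R u₀ e ret v
  rbx : v.reg .rbx = e.reg .rdi
  r12 : (v.reg .r12).toNat = F.pv
  count : (v.reg .rax).toNat ≤ 1
  adv : (v.reg .rax).toNat = 1 → rem R v.mem + 1 = rem R e.mem

/-- **1061C8H … the call of InternalRead … 1061E7H (ret2)** (dgif_lib.c:817 `Private = GifFile->Private`, the checked load;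
l.820 `InternalRead(GifFile, &CodeSize, 1)`). `edx = 1`, `rsi = &CodeSize = RA − 88` (the frame's object at base + 32),
`rdi = rbx = gif`. -/
theorem sd1_seg_call (Lay : Layout) (hLay : Lay.hi = 0x1000000) (μ : Microarch) (hμ : UserX.MicroOK μ) (u₀ : State)
    (hcode : HasCodeNat Lay u₀ Gif.L.DGifSetupDecompress.entry Gif.Code.code_DGifSetupDecompress.nat
      Gif.L.DGifSetupDecompress.size)
    (H : Heap) (rest : List Obj) (frames : List (Nat × FrameLayout)) (F : Forest) (R : Rd) (e : State) (ret : Word)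
    (h_InternalRead : Calls Lay μ ProgX.Base.WayInv (ProgX.Base.conv u₀) Gif.L.InternalRead.entry
      (Gif.Spec.InternalRead.spec H rest (DGifSetupDecompress.framesIn frames e) F R 1))
    (h_asan_load8_noabort : Asan.SmallCheck Lay μ ProgX.Base.WayInv (ProgX.Base.CodeOK u₀) [.rax, .rcx, .rdx] 8
      ProgX.Base.L.__asan_load8_noabort.entry)
    (v : State) (hat : DGifSetupDecompress.AfterP H rest frames F R u₀ e ret v) :
    ReachVia Lay μ ProgX.Base.WayInv v (sd1_AtRet2 H rest frames F R u₀ e ret) := by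
  -- THE PRELUDE: the entry assertion `AfterP` = `Body` + where gif is + the reader did not move
  obtain ⟨hbody, c_rdi, c_rbx, hrem_eq⟩ := hat
  have he := hbody.entry
  v_entry he
  obtain ⟨henv, hrdi⟩ := hbody.pre
  -- what the walker reads of a segment's entry state: rip, rsp (as `c_rsp`), the registers kept, the text, DF / MXCSR
  have w_rip := hbody.rip
  have c_rsp : v.reg .rsp = e.reg .rsp - 120 := hbody.rsp
  have w_kept : RegsKept [.rsp] v v := RegsKept.refl _ _
  have w_eq : Mem.EqOn ProgX.Base.L.textLo ProgX.Base.L.textHi u₀.mem v.mem := ProgX.Base.conv_code_eqOn hbody.code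
  have hdf := (show abiInv _ from hbody.abi).1
  have hmx := (show abiInv _ from hbody.abi).2
  have hsse := ProgX.Base.sseOK_of_abiInv hbody.abi
  -- the slots and the footprint that `Body` at the exit states again
  have k_r15 : v.mem.readLE (e.reg .rsp - 8) 8 = (e.reg .r15).toNat := hbody.slot_r15
  have k_r14 : v.mem.readLE (e.reg .rsp - 16) 8 = (e.reg .r14).toNat := hbody.slot_r14
  have k_r13 : v.mem.readLE (e.reg .rsp - 24) 8 = (e.reg .r13).toNat := hbody.slot_r13
  have k_r12 : v.mem.readLE (e.reg .rsp - 32) 8 = (e.reg .r12).toNat := hbody.slot_r12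
  have k_rbp : v.mem.readLE (e.reg .rsp - 40) 8 = (e.reg .rbp).toNat := hbody.slot_rbp
  have k_rbx : v.mem.readLE (e.reg .rsp - 48) 8 = (e.reg .rbx).toNat := hbody.slot_rbx
  have k_ra : UInt64.ofNat (v.mem.readLE (e.reg .rsp) 8) = ret := hbody.slot_ra
  have hsame : Mem.SameExcept
    [⟨(e.reg .rsp).toNat - 304, (e.reg .rsp).toNat⟩,
     shadowSpan ((e.reg .rsp).toNat - 120) ((e.reg .rsp).toNat - 56),
     ⟨F.pv + 8, F.pv + 56⟩,
     ⟨F.pv + 88, F.pv + 89⟩,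
     ⟨F.pv + 8536, F.pv + 24920⟩,
     ⟨F.gif + 96, F.gif + 100⟩,
     ⟨R.cur, R.cur + 8⟩] e.mem v.mem := hbody.same
  -- where the cursor, gif and pv are, as numbers (`v_side`, `u_same`, `u_omega` place every store with them)
  have hcur := henv.ctx.cursor_range henv.heap.inv.shadow
  have hgin := henv.ok.owns.inside henv.heap.inv.heap (o := (F.gif, 120)) List.mem_cons_self
  have hpin := henv.ok.owns.inside henv.heap.inv.heap (o := (F.pv, 24936)) (List.mem_cons_of_mem _ List.mem_cons_self)
  have hbase := henv.heap.base
  simp only at hgin hpin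
  rw [hbase] at hgin hpin
  have hg1 : 0x800040 ≤ F.gif := hgin.1
  have hg2 : F.gif + 152 ≤ 0xC00000 := hgin.2.2.2.2
  have hp1 : 0x800040 ≤ F.pv := hpin.1
  have hp2 : F.pv + 24968 ≤ 0xC00000 := hpin.2.2.2.2
  clear hgin hpin
  -- gif is live under the body's frames: what the check goal asks
  have hgl : LiveIn (H.liveObjs ++ rest) (DGifSetupDecompress.framesIn frames e) F.gif 120 :=
    hbody.ok.gif_live.liveIn rest _ (Nat.le_refl _) (Nat.le_refl _)
  -- the load of `GifFile->Private` (l.817), as a fact about the present memory in the walker's form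
  have hpriv := hbody.ok.shape.priv
  simp only [gfield] at hpriv
  have l_priv : v.mem.readLE (e.reg .rdi + 0x70) 8 = F.pv := by
    rw [rd_eq_readLE v.mem (e.reg .rdi + 0x70) (F.gif + 112) 8 (by u_omega)]
    exact hpriv
  -- THE WALK, to the call's return address
  u_walk hcode [hμ.vendor] until [Gif.L.DGifSetupDecompress.ret2] span [ProgX.Base.L.textLo, ProgX.Base.L.textHi] side (v_side)
  case check_1061cc =>
    -- dgif_lib.c:817 the load of `GifFile->Private`: 8 bytes inside gif
    have hun : ShadowUntouched v.mem s_1061cc.mem := by v_untouched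
    exact hgl.accSmall hbody.inv.shadow hun _ 8 (by decide) (by u_omega) (by u_omega)
  case call_inv =>
    v_inv
  case pre_1061e2 =>
    -- INTERNALREAD'S PRECONDITION. The environment for the frame list with the own frame in front: only return addresses were
    -- pushed since `v`
    have hs : Mem.SameExcept [⟨(e.reg .rsp).toNat - 304, (e.reg .rsp).toNat - 120⟩] v.mem s_1061e2.mem := by
      rw [w_mem]
      u_same
    have henv' : Env H rest (DGifSetupDecompress.framesIn frames e) F R s_1061e2 := by
      refine henv.at_call hbody.inv hbody.ok hs (by omega) (by omega) ?_ ?_ ?_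
      · rw [w_rsp]
        u_omega
      · rw [w_rsp]
        u_omega
      · rw [w_rsp]
        u_omega
    -- the buffer is the frame's object `CodeSize` (`[rsp + 0x20]` = base + 32, 1 byte), named by its numbers
    have ho : (⟨(e.reg .rsp).toNat - 120 + 32, 1, .stack⟩ : Obj) ∈
        Gif.Frames.DGifSetupDecompress.objsAt ((e.reg .rsp).toNat - 120) := List.mem_cons_self
    have hsz : Gif.Frames.DGifSetupDecompress.size = 64 := rfl
    have hb : (e.reg .rsp).toNat - 120 + Gif.Frames.DGifSetupDecompress.size ≤ (e.reg .rsp).toNat + 8 := by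
      rw [hsz]
      omega
    have hbuf : BufOK H rest (DGifSetupDecompress.framesIn frames e) F R (s_1061e2.reg .rsi).toNat 1 := by
      apply BufOK.own henv.heap henv.ctx hbody.inv hb ho
      · rw [w_rsi]
        u_omega
      · rw [w_rsi]
        u_omega
    -- the clauses: `Env`, `rdi = gif`, `edx = 1`, `1 ≤ 1`, `1 < 2 ^ 31`, `BufOK`
    refine ⟨henv', ?_, ?_, by decide, by decide, hbuf⟩
    · rw [w_rdi]
      exact hrdi
    · rw [w_rdx]
      decide
  -- 0x1061e7 (ret2): INTERNALREAD HAS RETURNED. Its post: `k` bytes delivered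
  obtain ⟨k, hk1, hk2, hk3, hk4, hk5, hback⟩ :
    ReadPost H rest (DGifSetupDecompress.framesIn frames e) F R 1 s_1061e2 s_1061e2r := w_post
  -- the reader at InternalRead's entry is the entry's: only the return address was pushed
  have hs0 : Mem.SameExcept [⟨(e.reg .rsp).toNat - 304, (e.reg .rsp).toNat - 120⟩] v.mem s_1061e2.mem := by
    rw [w_mem_1061e2]
    u_same
  have hrem0 : rem R s_1061e2.mem = rem R e.mem := by
    rw [← hrem_eq]
    apply rem_sameExcept hs0 (by omega)
    intro w hw
    have e := List.mem_singleton.mp hw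
    rw [e]
    simp only
    omega
  have e_top : (s_1061e2.reg .rsp).toNat + 8 = (e.reg .rsp).toNat - 120 := by
    rw [w_rsp_1061e2]
    u_omega
  -- the callee's footprint in terms of `v` (`w_same : SameExcept […] v.mem s_1061e2r.mem`)
  v_after_call w_rsp_1061e2 w_mem_1061e2
  simp only [w_rsi_1061e2] at w_same
  -- THE SLOTS AND THE RETURN ADDRESS, over the pushed return address (first step) and through InternalRead's footprint
  -- (second step: the buffer `CodeSize`, the cursor, the stack below)
  have hp15 : s_1061e2.mem.readLE (e.reg .rsp - 8) 8 = (e.reg .r15).toNat := by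
    rw [w_mem_1061e2]
    u_frame k_r15
  rw [w_mem_1061e2] at hp15
  have hs15 : s_1061e2r.mem.readLE (e.reg .rsp - 8) 8 = (e.reg .r15).toNat := by u_frame hp15
  have hp14 : s_1061e2.mem.readLE (e.reg .rsp - 16) 8 = (e.reg .r14).toNat := by
    rw [w_mem_1061e2]
    u_frame k_r14
  rw [w_mem_1061e2] at hp14
  have hs14 : s_1061e2r.mem.readLE (e.reg .rsp - 16) 8 = (e.reg .r14).toNat := by u_frame hp14
  have hp13 : s_1061e2.mem.readLE (e.reg .rsp - 24) 8 = (e.reg .r13).toNat := by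
    rw [w_mem_1061e2]
    u_frame k_r13
  rw [w_mem_1061e2] at hp13
  have hs13 : s_1061e2r.mem.readLE (e.reg .rsp - 24) 8 = (e.reg .r13).toNat := by u_frame hp13
  have hp12 : s_1061e2.mem.readLE (e.reg .rsp - 32) 8 = (e.reg .r12).toNat := by
    rw [w_mem_1061e2]
    u_frame k_r12
  rw [w_mem_1061e2] at hp12
  have hs12 : s_1061e2r.mem.readLE (e.reg .rsp - 32) 8 = (e.reg .r12).toNat := by u_frame hp12
  have hpbp : s_1061e2.mem.readLE (e.reg .rsp - 40) 8 = (e.reg .rbp).toNat := by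
    rw [w_mem_1061e2]
    u_frame k_rbp
  rw [w_mem_1061e2] at hpbp
  have hsbp : s_1061e2r.mem.readLE (e.reg .rsp - 40) 8 = (e.reg .rbp).toNat := by u_frame hpbp
  have hpbx : s_1061e2.mem.readLE (e.reg .rsp - 48) 8 = (e.reg .rbx).toNat := by
    rw [w_mem_1061e2]
    u_frame k_rbx
  rw [w_mem_1061e2] at hpbx
  have hsbx : s_1061e2r.mem.readLE (e.reg .rsp - 48) 8 = (e.reg .rbx).toNat := by u_frame hpbx
  have hpra : UInt64.ofNat (s_1061e2.mem.readLE (e.reg .rsp) 8) = ret := by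
    rw [w_mem_1061e2]
    u_frame k_ra
  rw [w_mem_1061e2] at hpra
  have hsra : UInt64.ofNat (s_1061e2r.mem.readLE (e.reg .rsp) 8) = ret := by u_frame hpra
  -- the footprint since the entry: InternalRead's windows lie inside the function's
  have hsame1 : Mem.SameExcept
    [⟨(e.reg .rsp).toNat - 304, (e.reg .rsp).toNat⟩,
     shadowSpan ((e.reg .rsp).toNat - 120) ((e.reg .rsp).toNat - 56),
     ⟨F.pv + 8, F.pv + 56⟩,
     ⟨F.pv + 88, F.pv + 89⟩,
     ⟨F.pv + 8536, F.pv + 24920⟩,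
     ⟨F.gif + 96, F.gif + 100⟩,
     ⟨R.cur, R.cur + 8⟩] e.mem s_1061e2r.mem := by u_same
  -- the heap's invariant comes back with the clean stack at the callee's `rsp + 8` = the body's `rsp`
  have hinv1 : HeapInv H rest (DGifSetupDecompress.framesIn frames e) ((e.reg .rsp).toNat - 120) s_1061e2r.mem := by
    rw [← e_top]
    exact hback.inv
  -- THE EXIT ASSERTION: `Body` at `ret2` …
  have hbody1 : DGifSetupDecompress.Body Gif.L.DGifSetupDecompress.ret2 H rest frames F R u₀ e ret s_1061e2r := {
    entry := hbody.entry
    pre := hbody.pre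
    rip := w_rip
    rsp := w_rsp
    r13 := (w_kept.get .r13 rfl).trans hbody.r13
    slot_r15 := hs15
    slot_r14 := hs14
    slot_r13 := hs13
    slot_r12 := hs12
    slot_rbp := hsbp
    slot_rbx := hsbx
    slot_ra := hsra
    inv := hinv1
    ok := hback.ok
    rem := by
      rw [← hrem0]
      exact hback.rem
    same := hsame1
    code := w_code
    abi := w_inv
  }
  -- … and what is live at `ret2`: gif and Private in their registers, the count in `eax`
  refine ReachVia.done ?_
  exact {
    body := hbody1
    rbx := (w_kept.get .rbx rfl).trans c_rbx
    r12 := by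
      rw [w_r12]
      u_omega
    count := by
      rw [hk4]
      exact hk1
    adv := by
      intro h1
      rw [hk4] at h1
      rw [hk5, hrem0]
      rw [hrem0] at hk2
      omega
  }

/-- **`movzx ebp, r15b` of a zero-extended byte is that byte again** (1061EFH `movzx r15d, byte [rsp + 0x20]`, 1061F5H
`movzx ebp, r15b`): `r15 = rbp` at the store block. -/
theorem sd1_byte_eq (x : BitVec 8) :
    BitVec.zeroExtend 32 (BitVec.setWidth 8 (BitVec.zeroExtend 32 x)) = BitVec.zeroExtend 32 x := by
  bv_decide

/-- **The test l.828 `CodeSize − 2 > 6` (unsigned), not taken** (`lea eax, [rbp − 2] ; cmp eax, 6 ; ja`, as the walker leaves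
it): the zero-extended byte lies in 2 … 8. -/
theorem sd1_byte_range (x : BitVec 8)
    (h : (BitVec.setWidth 32 (Word.ofBV (BitVec.zeroExtend 32 x) - 2).toBitVec).toNat ≤ 6) :
    2 ≤ (Word.ofBV (BitVec.zeroExtend 32 x)).toNat ∧ (Word.ofBV (BitVec.zeroExtend 32 x)).toNat ≤ 8 := by
  rw [toNat_ofBV32]
  have hx := x.isLt
  have e1 : (BitVec.zeroExtend 32 x).toNat = x.toNat := by
    simp only [BitVec.zeroExtend, BitVec.toNat_setWidth]
    omega
  rw [e1]
  have e2 : (Word.ofBV (BitVec.zeroExtend 32 x) - 2).toNat = (x.toNat + 2 ^ 64 - 2) % 2 ^ 64 := by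
    rw [UInt64.toNat_sub, toNat_ofBV32, e1]
    have e3 : (2 : UInt64).toNat = 2 := by decide
    rw [e3]
    omega
  rw [BitVec.toNat_setWidth, UInt64.toNat_toBitVec, e2] at h
  omega

/-- **1061E7H (ret2) … 106205H | 10633AH** (dgif_lib.c:820-831): `test eax, eax ; jle`: no byte: the checked store of
`gif.Error = 102`, `eax = 0`, to the epilogue; else `CodeSize` in `r15d` / `ebp`, `CodeSize − 2 > 6` (unsigned): the same error
arm; else to the store block. -/
theorem sd1_seg_tail (Lay : Layout) (hLay : Lay.hi = 0x1000000) (μ : Microarch) (hμ : UserX.MicroOK μ) (u₀ : State)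
    (hcode : HasCodeNat Lay u₀ Gif.L.DGifSetupDecompress.entry Gif.Code.code_DGifSetupDecompress.nat
      Gif.L.DGifSetupDecompress.size)
    (H : Heap) (rest : List Obj) (frames : List (Nat × FrameLayout)) (F : Forest) (R : Rd) (e : State) (ret : Word)
    (h_asan_store4_noabort : Asan.SmallCheck Lay μ ProgX.Base.WayInv (ProgX.Base.CodeOK u₀) [.rax, .rcx, .rdx] 4
      ProgX.Base.L.__asan_store4_noabort.entry)
    (v : State) (hat : sd1_AtRet2 H rest frames F R u₀ e ret v) :
    ReachVia Lay μ ProgX.Base.WayInv v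
      (fun w => DGifSetupDecompress.AtStores H rest frames F R u₀ e ret w ∨
        DGifSetupDecompress.Done H rest frames F R u₀ e ret w) := by
  -- THE PRELUDE: the entry assertion, as in `sd1_seg_call`
  obtain ⟨hbody, c_rbx, hr12, hcount, hadv⟩ := hat
  have he := hbody.entry
  v_entry he
  obtain ⟨henv, hrdi⟩ := hbody.pre
  have w_rip := hbody.rip
  have c_rsp : v.reg .rsp = e.reg .rsp - 120 := hbody.rsp
  -- `eax` as a variable `z` (the branch fact of `test eax, eax` speaks of it)
  obtain ⟨z, c_rax⟩ : ∃ z, v.reg .rax = z := ⟨_, rfl⟩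
  rw [c_rax] at hcount hadv
  have w_kept : RegsKept [.rsp] v v := RegsKept.refl _ _
  have w_eq : Mem.EqOn ProgX.Base.L.textLo ProgX.Base.L.textHi u₀.mem v.mem := ProgX.Base.conv_code_eqOn hbody.code
  have hdf := (show abiInv _ from hbody.abi).1
  have hmx := (show abiInv _ from hbody.abi).2
  have hsse := ProgX.Base.sseOK_of_abiInv hbody.abi
  have k_r15 : v.mem.readLE (e.reg .rsp - 8) 8 = (e.reg .r15).toNat := hbody.slot_r15
  have k_r14 : v.mem.readLE (e.reg .rsp - 16) 8 = (e.reg .r14).toNat := hbody.slot_r14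
  have k_r13 : v.mem.readLE (e.reg .rsp - 24) 8 = (e.reg .r13).toNat := hbody.slot_r13
  have k_r12 : v.mem.readLE (e.reg .rsp - 32) 8 = (e.reg .r12).toNat := hbody.slot_r12
  have k_rbp : v.mem.readLE (e.reg .rsp - 40) 8 = (e.reg .rbp).toNat := hbody.slot_rbp
  have k_rbx : v.mem.readLE (e.reg .rsp - 48) 8 = (e.reg .rbx).toNat := hbody.slot_rbx
  have k_ra : UInt64.ofNat (v.mem.readLE (e.reg .rsp) 8) = ret := hbody.slot_ra
  have hsame : Mem.SameExcept
    [⟨(e.reg .rsp).toNat - 304, (e.reg .rsp).toNat⟩,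
     shadowSpan ((e.reg .rsp).toNat - 120) ((e.reg .rsp).toNat - 56),
     ⟨F.pv + 8, F.pv + 56⟩,
     ⟨F.pv + 88, F.pv + 89⟩,
     ⟨F.pv + 8536, F.pv + 24920⟩,
     ⟨F.gif + 96, F.gif + 100⟩,
     ⟨R.cur, R.cur + 8⟩] e.mem v.mem := hbody.same
  have hcur := henv.ctx.cursor_range henv.heap.inv.shadow
  have hgin := henv.ok.owns.inside henv.heap.inv.heap (o := (F.gif, 120)) List.mem_cons_self
  have hbase := henv.heap.base
  simp only at hgin
  rw [hbase] at hgin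
  have hg1 : 0x800040 ≤ F.gif := hgin.1
  have hg2 : F.gif + 152 ≤ 0xC00000 := hgin.2.2.2.2
  clear hgin
  -- gif is live under the body's frames: what both check goals ask
  have hgl : LiveIn (H.liveObjs ++ rest) (DGifSetupDecompress.framesIn frames e) F.gif 120 :=
    hbody.ok.gif_live.liveIn rest _ (Nat.le_refl _) (Nat.le_refl _)
  -- THE WALK, three arms, to the store block or to the epilogue's first instruction
  u_walk hcode [hμ.vendor] until [Gif.L.DGifSetupDecompress.at_106205, Gif.L.DGifSetupDecompress.at_10633a]
    span [ProgX.Base.L.textLo, ProgX.Base.L.textHi] side (v_side)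
  case check_1062ea =>
    -- dgif_lib.c:822 the store of `gif.Error` (short read)
    have hun : ShadowUntouched v.mem s_1062ea.mem := by v_untouched
    exact hgl.accSmall hbody.inv.shadow hun _ 4 (by decide) (by u_omega) (by u_omega)
  case check_106301 =>
    -- dgif_lib.c:829 the store of `gif.Error` (code size out of range)
    have hun : ShadowUntouched v.mem s_106301.mem := by v_untouched
    exact hgl.accSmall hbody.inv.shadow hun _ 4 (by decide) (by u_omega) (by u_omega)
  · -- 0x10633a FROM 0x1062fb: `gif.Error = D_GIF_ERR_READ_FAILED` stored, eax = 0
    -- the two stores since `v`: the check call's return address (stack), then `gif.Error`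
    obtain ⟨hinvA, hokA, hremA⟩ := store_stack hbody.inv hbody.ok ⟨hcur.1, hcur.2.1⟩ (e.reg .rsp - 128) 8 1073903
      (by u_omega) (by u_omega)
    obtain ⟨hinvB, hokB, hremB⟩ := store_gif hinvA hokA ⟨hcur.1, hcur.2.1⟩ hbase (e.reg .rdi + 96) 4 102
      (Or.inr (Or.inr (by u_omega)))
    rw [← w_mem] at hinvB hokB hremB
    have hremF : rem R s_1062fb.mem = rem R v.mem := hremB.trans hremA
    -- THE EXIT ASSERTION: `Body` at 0x10633a …
    have hbody1 : DGifSetupDecompress.Body Gif.L.DGifSetupDecompress.at_10633a H rest frames F R u₀ e ret s_1062fb := {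
      entry := hbody.entry
      pre := hbody.pre
      rip := w_rip
      rsp := w_rsp
      r13 := (w_kept.get .r13 rfl).trans hbody.r13
      slot_r15 := by
        rw [w_mem]
        u_frame k_r15
      slot_r14 := by
        rw [w_mem]
        u_frame k_r14
      slot_r13 := by
        rw [w_mem]
        u_frame k_r13
      slot_r12 := by
        rw [w_mem]
        u_frame k_r12
      slot_rbp := by
        rw [w_mem]
        u_frame k_rbp
      slot_rbx := by
        rw [w_mem]
        u_frame k_rbx
      slot_ra := by
        rw [w_mem]
        u_frame k_ra
      inv := hinvB
      ok := hokB
      rem := by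
        rw [hremF]
        exact hbody.rem
      same := by
        rw [w_mem]
        u_same
      code := ProgX.Base.conv_code_in w_eq
      abi := by
        refine ProgX.Base.abiInv_of ?_ ?_
        · rw [w_flags]
          exact w_df_1062ea
        · rw [w_mxcsr]
          exact hmx
    }
    -- … and the result: GIF_ERROR
    refine ReachVia.done (Or.inr ?_)
    exact {
      body := hbody1
      res := by
        right
        rw [w_rax]
        decide
      ok1 := by
        intro h1
        rw [w_rax] at h1
        exact absurd h1 (by decide)
    }
  · -- 0x10633a FROM 0x106312: `gif.Error = D_GIF_ERR_READ_FAILED` stored, eax = 0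
    -- the two stores since `v`: the check call's return address (stack), then `gif.Error`
    obtain ⟨hinvA, hokA, hremA⟩ := store_stack hbody.inv hbody.ok ⟨hcur.1, hcur.2.1⟩ (e.reg .rsp - 128) 8 1073926
      (by u_omega) (by u_omega)
    obtain ⟨hinvB, hokB, hremB⟩ := store_gif hinvA hokA ⟨hcur.1, hcur.2.1⟩ hbase (e.reg .rdi + 96) 4 102
      (Or.inr (Or.inr (by u_omega)))
    rw [← w_mem] at hinvB hokB hremB
    have hremF : rem R s_106312.mem = rem R v.mem := hremB.trans hremA
    -- THE EXIT ASSERTION: `Body` at 0x10633a …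
    have hbody1 : DGifSetupDecompress.Body Gif.L.DGifSetupDecompress.at_10633a H rest frames F R u₀ e ret s_106312 := {
      entry := hbody.entry
      pre := hbody.pre
      rip := w_rip
      rsp := w_rsp
      r13 := (w_kept.get .r13 rfl).trans hbody.r13
      slot_r15 := by
        rw [w_mem]
        u_frame k_r15
      slot_r14 := by
        rw [w_mem]
        u_frame k_r14
      slot_r13 := by
        rw [w_mem]
        u_frame k_r13
      slot_r12 := by
        rw [w_mem]
        u_frame k_r12
      slot_rbp := by
        rw [w_mem]
        u_frame k_rbp
      slot_rbx := by
        rw [w_mem]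
        u_frame k_rbx
      slot_ra := by
        rw [w_mem]
        u_frame k_ra
      inv := hinvB
      ok := hokB
      rem := by
        rw [hremF]
        exact hbody.rem
      same := by
        rw [w_mem]
        u_same
      code := ProgX.Base.conv_code_in w_eq
      abi := by
        refine ProgX.Base.abiInv_of ?_ ?_
        · rw [w_flags]
          exact w_df_106301
        · rw [w_mxcsr]
          exact hmx
    }
    -- … and the result: GIF_ERROR
    refine ReachVia.done (Or.inr ?_)
    exact {
      body := hbody1
      res := by
        right
        rw [w_rax]
        decide
      ok1 := by
        intro h1
        rw [w_rax] at h1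
        exact absurd h1 (by decide)
    }
  · -- 0x106205 FROM 0x1061ff: one byte was read, `2 ≤ CodeSize ≤ 8`; nothing was stored since `v`
    -- the byte `CodeSize` as a variable
    obtain ⟨x, hx⟩ : ∃ x : BitVec 8, x = BitVec.ofNat 8 (v.mem.readLE (e.reg .rsp - 88) 1) := ⟨_, rfl⟩
    rw [← hx] at hbr_1061ff w_rbp w_r15
    rw [sd1_byte_eq] at hbr_1061ff w_rbp
    have hrange := sd1_byte_range x hbr_1061ff
    -- the branch fact of `test eax, eax ; jle`, not taken: `eax = 1`
    have hz : z.toNat = 1 := by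
      rw [toNat_part32] at hbr_1061e9
      omega
    -- THE EXIT ASSERTION: `Body` at 0x106205 …
    have hbody1 : DGifSetupDecompress.Body Gif.L.DGifSetupDecompress.at_106205 H rest frames F R u₀ e ret s_1061ff := {
      entry := hbody.entry
      pre := hbody.pre
      rip := w_rip
      rsp := w_rsp
      r13 := (w_kept.get .r13 rfl).trans hbody.r13
      slot_r15 := by
        rw [w_mem]
        exact k_r15
      slot_r14 := by
        rw [w_mem]
        exact k_r14
      slot_r13 := by
        rw [w_mem]
        exact k_r13
      slot_r12 := by
        rw [w_mem]
        exact k_r12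
      slot_rbp := by
        rw [w_mem]
        exact k_rbp
      slot_rbx := by
        rw [w_mem]
        exact k_rbx
      slot_ra := by
        rw [w_mem]
        exact k_ra
      inv := by
        rw [w_mem]
        exact hbody.inv
      ok := by
        rw [w_mem]
        exact hbody.ok
      rem := by
        rw [w_mem]
        exact hbody.rem
      same := by
        rw [w_mem]
        exact hsame
      code := ProgX.Base.conv_code_in w_eq
      abi := by
        refine ProgX.Base.abiInv_of ?_ ?_
        · rw [w_flags]
          simp only [X86.User.df_setStatus]
          exact hdf
        · rw [w_mxcsr]
          exact hmx
    }
    -- … and what the store block needs: Private, the code size twice, exactly one byte consumed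
    refine ReachVia.done (Or.inl ?_)
    exact {
      body := hbody1
      r12 := by
        rw [w_kept.get .r12 rfl]
        exact hr12
      size_lo := by
        rw [w_rbp]
        exact hrange.1
      size_hi := by
        rw [w_rbp]
        exact hrange.2
      r15 := by
        rw [w_r15, w_rbp]
      rem1 := by
        rw [w_mem]
        exact hadv hz
    }

end Gif.Spec.DGifSetupDecompress_1
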